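-- pv_equiv track=rewrite | github.com/HHS-Proclub/hhs-pro-club-website | solutions2020/PRA9/sunnykyle1@icloud.com.py | find_closest_smaller
-- ===== SOURCE A (Python) =====
-- already_done2 = {}
--
-- def find_closest_smaller(numbers, target):
--     '''
--     Uses binary search to find the closest smaller or equal umber to the given
--     one. Given list must be sorted!
--     '''
--     if len(numbers) == 0 or numbers[0] > target:
--         return -1
--     key = str(numbers) + ';' + str(target)
--     if key in already_done2:
--         return already_done2[key]
--     done = False
--     best_number = numbers[0]
--     while not done:
--         if len(numbers) == 0:
--             break
--         curr_index = int(len(numbers) / 2)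
--         if numbers[curr_index] > target:
--             numbers = numbers[:curr_index]
--         else:
--             if target - numbers[curr_index] <= target - best_number:
--                 best_number = numbers[curr_index]
--             numbers = numbers[curr_index+1:]
--     already_done2[key] = best_number
--     return best_number
-- ===== SOURCE B (Python) =====
-- def find_closest_smaller(numbers, target):
--     """Index-based binary search (lo/hi pointers): largest candidate <= target,
--     no slicing, no memo dict."""
--     if not numbers or numbers[0] > target:
--         return -1
--     best = numbers[0]
--     lo, hi = 0, len(numbers)
--     while lo < hi:
--         mid = lo + (hi - lo) // 2
--         x = numbers[mid]
--         if x > target: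
--             hi = mid
--         else:
--             best = max(best, x)
--             lo = mid + 1
--     return best
-- ===== Notes on version B (the rewrite author's own statement) =====
-- stated objective: alternative
-- what changed: Replaced A's slice-and-recurse binary search (which copies a sublist each step and maintains a string-keyed memo dict) with an in-place lo/hi index binary search keeping best = max(best, x); no slicing, no memo.
import Mathlib
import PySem

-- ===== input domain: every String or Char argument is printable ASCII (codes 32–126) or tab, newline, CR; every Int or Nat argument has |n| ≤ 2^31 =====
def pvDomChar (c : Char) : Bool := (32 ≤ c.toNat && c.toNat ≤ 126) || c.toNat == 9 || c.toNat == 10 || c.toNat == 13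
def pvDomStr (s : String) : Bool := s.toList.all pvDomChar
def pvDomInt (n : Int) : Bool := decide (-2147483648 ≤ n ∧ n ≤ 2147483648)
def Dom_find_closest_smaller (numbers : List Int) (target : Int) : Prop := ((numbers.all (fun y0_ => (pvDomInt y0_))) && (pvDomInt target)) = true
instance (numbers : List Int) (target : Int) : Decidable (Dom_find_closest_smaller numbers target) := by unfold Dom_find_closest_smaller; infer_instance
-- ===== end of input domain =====

-- B replaces A's slice-copying binary search (plus memo dict) with an index-based
-- lo/hi binary search: same return value, no list copying (objective: alternative).


-- ===== PORT A =====
-- the while loop of A; `numbers[:c]` / `numbers[c+1:]` (nonnegative in-range slice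
-- bounds) are exactly List.take / List.drop; int(len/2) = len/2 in Nat
def pvALoop (target : Int) (numbers : List Int) (best : Int) : Int :=
  if numbers.length = 0 then best
  else
    let c := numbers.length / 2
    let x := numbers.getD c 0   -- index c < length, so equal to Python numbers[c]
    if x > target then pvALoop target (numbers.take c) best
    else pvALoop target (numbers.drop (c + 1))
           (if target - x ≤ target - best then x else best)
termination_by numbers.length
decreasing_by
  all_goals simp [List.length_take, List.length_drop]; omega

-- the memo dict `already_done2` only caches the value the loop computes; it never
-- changes the returned value, so the port omits it
def find_closest_smaller (numbers : List Int) (target : Int) : Int :=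
  if numbers.length = 0 ∨ numbers.getD 0 0 > target then -1
  else pvALoop target numbers (numbers.getD 0 0)

-- ===== PORT B =====
def pvBLoop (numbers : List Int) (target : Int) (lo hi : Nat) (best : Int) : Int :=
  if lo < hi then
    let mid := lo + (hi - lo) / 2
    let x := numbers.getD mid 0
    if x > target then pvBLoop numbers target lo mid best
    else pvBLoop numbers target (mid + 1) hi (max best x)
  else best
termination_by hi - lo
decreasing_by all_goals omega

def find_closest_smaller_alt (numbers : List Int) (target : Int) : Int :=
  match numbers with
  | [] => -1
  | x :: _ =>
    if x > target then -1
    else pvBLoop numbers target 0 numbers.length x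

-- ===== PRECONDITION & SPEC =====
def Spec_find_closest_smaller (numbers : List Int) (target : Int) (out : Int) : Prop := out = find_closest_smaller_alt numbers target
instance (numbers : List Int) (target : Int) (out : Int) : Decidable (Spec_find_closest_smaller numbers target out) := by unfold Spec_find_closest_smaller; infer_instance

-- ===== CLAIM (what is proved, stated in full; the proofs are below) =====
def Claim_equal_find_closest_smaller : Prop := ∀ (numbers : List Int) (target : Int), Dom_find_closest_smaller numbers target → Spec_find_closest_smaller numbers target (find_closest_smaller numbers target)

-- ===== LEMMAS AND PROOFS =====

-- B's window [lo, hi) computes what A's loop computes on the slice (drop lo).take (hi - lo)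
theorem pvBLoop_eq (numbers : List Int) (target : Int) :
    ∀ (k lo hi : Nat) (best : Int), hi - lo = k → hi ≤ numbers.length →
      pvBLoop numbers target lo hi best
        = pvALoop target ((numbers.drop lo).take (hi - lo)) best := by
  intro k
  induction k using Nat.strong_induction_on with
  | _ k ih =>
    intro lo hi best hk hhi
    by_cases hlt : lo < hi
    · have hwlen : ((numbers.drop lo).take (hi - lo)).length = hi - lo := by
        simp [List.length_take, List.length_drop]; omega
      have hc : ((numbers.drop lo).take (hi - lo)).length / 2 = (hi - lo) / 2 := by
        rw [hwlen]
      have hmidlt : lo + (hi - lo) / 2 < numbers.length := by omega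
      have hx : ((numbers.drop lo).take (hi - lo)).getD ((hi - lo) / 2) 0
          = numbers.getD (lo + (hi - lo) / 2) 0 := by
        rw [List.getD_eq_getElem?_getD, List.getD_eq_getElem?_getD,
            List.getElem?_take, List.getElem?_drop]
        simp only [if_pos (by omega : (hi - lo) / 2 < hi - lo)]
      rw [pvBLoop, pvALoop]
      simp only [hwlen, hx]
      have hk0 : hi - lo ≠ 0 := by omega
      rw [if_pos hlt, if_neg hk0]
      set mid := lo + (hi - lo) / 2 with hmid
      by_cases hgt : numbers.getD mid 0 > target
      · rw [if_pos hgt, if_pos hgt]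
        have htake : ((numbers.drop lo).take (hi - lo)).take ((hi - lo) / 2)
            = (numbers.drop lo).take (mid - lo) := by
          rw [List.take_take]; congr 1; omega
        rw [htake, ih ((hi - lo) / 2) (by omega) lo mid best (by omega) (by omega)]
      · rw [if_neg hgt, if_neg hgt]
        have e1 : lo + ((hi - lo) / 2 + 1) = mid + 1 := by omega
        have e2 : hi - lo - ((hi - lo) / 2 + 1) = hi - (mid + 1) := by omega
        have hdrop : ((numbers.drop lo).take (hi - lo)).drop ((hi - lo) / 2 + 1)
            = (numbers.drop (mid + 1)).take (hi - (mid + 1)) := by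
          rw [List.drop_take, List.drop_drop, e1, e2]
        have hbest : (if target - numbers.getD mid 0 ≤ target - best
              then numbers.getD mid 0 else best) = max best (numbers.getD mid 0) := by
          by_cases hb : best ≤ numbers.getD mid 0
          · rw [if_pos (by omega), max_eq_right hb]
          · rw [if_neg (by omega), max_eq_left (by omega)]
        rw [hdrop, hbest, ih (hi - (mid + 1)) (by omega) (mid + 1) hi _ (by omega) hhi]
    · rw [pvBLoop, pvALoop]
      have : hi - lo = 0 := by omega
      simp [if_neg hlt, this]

-- ===== VERDICT (by name: the statement is the Claim_ definition above) =====
theorem find_closest_smaller_spec : Claim_equal_find_closest_smaller := by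
  unfold Claim_equal_find_closest_smaller
  intro numbers target _
  unfold Spec_find_closest_smaller find_closest_smaller find_closest_smaller_alt
  cases numbers with
  | nil => simp
  | cons x xs =>
    by_cases hx : x > target
    · simp [List.getD, hx]
    · have h := pvBLoop_eq (x :: xs) target ((x :: xs).length - 0) 0 (x :: xs).length x
        rfl le_rfl
      simp only [List.drop_zero, Nat.sub_zero, List.take_length] at h
      simpa [List.getD, hx] using h.symm
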